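-- pv_equiv track=rewrite | github.com/ShuvalovAnthony/ege | 19_21/boba.py | f
-- ===== SOURCE A (Python) =====
-- def f(s1, s2, step=1): # 1p 2v 3p 4v 5p 6v proverka na 3 / 5
--     if (s1 + s2 >= 30) and (step in (3, 5)): return 1
--     elif (s1 + s2 < 30 and step == 5) or\
--         (s1 + s2 >= 30 and step < 5): return 0
--
--     if step%2: # petya
--         return f(s1 + 1, s2, step + 1) and f(s1, s2 + 1, step + 1) and\
--             f(s1*2, s2, step + 1) and f(s1, s2*2, step + 1)
--     return f(s1 + 1, s2, step + 1) or f(s1, s2 + 1, step + 1) or\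
--             f(s1*2, s2, step + 1) or f(s1, s2*2, step + 1)
-- ===== SOURCE B (Python) =====
-- def f(s1, s2, step=1):
--     memo = {}
--
--     def solve(s1, s2, step):
--         key = (s1, s2, step)
--         if key in memo:
--             return memo[key]
--         total = s1 + s2
--         if total >= 30 and step in (3, 5):
--             return 1
--         if (total < 30 and step == 5) or (total >= 30 and step < 5):
--             return 0
--         children = [solve(s1 + 1, s2, step + 1),
--                     solve(s1, s2 + 1, step + 1),
--                     solve(s1 * 2, s2, step + 1),
--                     solve(s1, s2 * 2, step + 1)]
--         if step % 2:
--             res = 1 if all(children) else 0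
--         else:
--             res = 1 if any(children) else 0
--         memo[key] = res
--         return res
--
--     return solve(s1, s2, step)
-- ===== Notes on version B (the rewrite author's own statement) =====
-- stated objective: alternative
-- what changed: Replaces A's naive exponential game-tree recursion (short-circuiting and/or chains) by top-down dynamic programming: an explicit memo dict keyed by (s1,s2,step) is threaded through the search, each reachable state is evaluated once, and the four children's 0/1 results are combined with all()/any().
import Mathlib
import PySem

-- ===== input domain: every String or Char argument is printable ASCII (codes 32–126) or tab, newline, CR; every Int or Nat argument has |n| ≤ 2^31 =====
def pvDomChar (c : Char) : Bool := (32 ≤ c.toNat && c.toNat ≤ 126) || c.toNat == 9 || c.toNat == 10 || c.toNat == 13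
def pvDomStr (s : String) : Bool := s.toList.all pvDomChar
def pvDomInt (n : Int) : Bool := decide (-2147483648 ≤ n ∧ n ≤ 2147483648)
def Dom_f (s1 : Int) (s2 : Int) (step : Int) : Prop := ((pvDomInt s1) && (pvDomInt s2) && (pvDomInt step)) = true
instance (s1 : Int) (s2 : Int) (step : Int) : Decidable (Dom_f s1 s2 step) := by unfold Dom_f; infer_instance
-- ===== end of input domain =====

-- B replaces A's naive exponential recursion by top-down DP with an explicit memo dict; objective: alternative (same results, each state evaluated once).


-- ===== PORT A =====
-- Python 'x and y' / 'x or y' on 0/1 ints (value semantics)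
def pyAndI (a b : Int) : Int := if a = 0 then a else b
def pyOrI (a b : Int) : Int := if a ≠ 0 then a else b

-- A's recursion; fuel = (5 - step).toNat bounds the depth (within Pre_ the fuel-0 default is never reached)
def fgoA : Nat → Int → Int → Int → Int
  | fuel, s1, s2, step =>
    if s1 + s2 ≥ 30 ∧ (step = 3 ∨ step = 5) then 1
    else if (s1 + s2 < 30 ∧ step = 5) ∨ (s1 + s2 ≥ 30 ∧ step < 5) then 0
    else match fuel with
      | 0 => 0
      | fuel' + 1 =>
        if PySem.Int.mod step 2 ≠ 0 then
          pyAndI (pyAndI (pyAndI (fgoA fuel' (s1 + 1) s2 (step + 1)) (fgoA fuel' s1 (s2 + 1) (step + 1)))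
            (fgoA fuel' (s1 * 2) s2 (step + 1))) (fgoA fuel' s1 (s2 * 2) (step + 1))
        else
          pyOrI (pyOrI (pyOrI (fgoA fuel' (s1 + 1) s2 (step + 1)) (fgoA fuel' s1 (s2 + 1) (step + 1)))
            (fgoA fuel' (s1 * 2) s2 (step + 1))) (fgoA fuel' s1 (s2 * 2) (step + 1))

def f (s1 : Int) (s2 : Int) (step : Int) : Int := fgoA (5 - step).toNat s1 s2 step

-- ===== PORT B =====
-- B's memoized search: the memo dict is threaded through the four child calls and the result stored.
def fgoB : Nat → Int → Int → Int → PySem.Dict (Int × Int × Int) Int →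
    Int × PySem.Dict (Int × Int × Int) Int
  | fuel, s1, s2, step, memo =>
    match memo.get? (s1, s2, step) with
    | some v => (v, memo)
    | none =>
      if s1 + s2 ≥ 30 ∧ (step = 3 ∨ step = 5) then (1, memo)
      else if (s1 + s2 < 30 ∧ step = 5) ∨ (s1 + s2 ≥ 30 ∧ step < 5) then (0, memo)
      else match fuel with
        | 0 => (0, memo)
        | fuel' + 1 =>
          let p1 := fgoB fuel' (s1 + 1) s2 (step + 1) memo
          let p2 := fgoB fuel' s1 (s2 + 1) (step + 1) p1.2
          let p3 := fgoB fuel' (s1 * 2) s2 (step + 1) p2.2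
          let p4 := fgoB fuel' s1 (s2 * 2) (step + 1) p3.2
          let res : Int :=
            if PySem.Int.mod step 2 ≠ 0 then
              if p1.1 ≠ 0 ∧ p2.1 ≠ 0 ∧ p3.1 ≠ 0 ∧ p4.1 ≠ 0 then 1 else 0
            else
              if p1.1 ≠ 0 ∨ p2.1 ≠ 0 ∨ p3.1 ≠ 0 ∨ p4.1 ≠ 0 then 1 else 0
          (res, p4.2.insert (s1, s2, step) res)

def f_alt (s1 : Int) (s2 : Int) (step : Int) : Int :=
  (fgoB (5 - step).toNat s1 s2 step PySem.Dict.empty).1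

-- ===== PRECONDITION & SPEC =====
-- Pre_ excludes exactly step > 5, where A never reaches a base case (both terminal tests require
-- step ≤ 5) and the unbounded recursion always raises RecursionError; for every step ≤ 5 A's
-- recursion is finite (depth 5 - step) and returns, and B matches it.
def Pre_f (s1 : Int) (s2 : Int) (step : Int) : Prop := step ≤ 5
instance (s1 : Int) (s2 : Int) (step : Int) : Decidable (Pre_f s1 s2 step) := by unfold Pre_f; infer_instance
def pvWitness_f : Int × Int × Int := (14, 15, 1)
def Spec_f (s1 : Int) (s2 : Int) (step : Int) (out : Int) : Prop := out = f_alt s1 s2 step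
instance (s1 : Int) (s2 : Int) (step : Int) (out : Int) : Decidable (Spec_f s1 s2 step out) := by unfold Spec_f; infer_instance

-- ===== CLAIM (what is proved, stated in full; the proofs are below) =====
def Claim_equal_f : Prop := ∀ (s1 : Int) (s2 : Int) (step : Int), Dom_f s1 s2 step → Pre_f s1 s2 step → Spec_f s1 s2 step (f s1 s2 step)

-- ===== LEMMAS AND PROOFS =====

-- equation lemmas for the two recursions
theorem fgoA_term1 (fuel : Nat) (s1 s2 step : Int) (hT1 : s1 + s2 ≥ 30 ∧ (step = 3 ∨ step = 5)) :
    fgoA fuel s1 s2 step = 1 := by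
  cases fuel <;> · rw [fgoA, if_pos hT1]

theorem fgoA_term2 (fuel : Nat) (s1 s2 step : Int) (hT1 : ¬(s1 + s2 ≥ 30 ∧ (step = 3 ∨ step = 5)))
    (hT2 : (s1 + s2 < 30 ∧ step = 5) ∨ (s1 + s2 ≥ 30 ∧ step < 5)) :
    fgoA fuel s1 s2 step = 0 := by
  cases fuel <;> · rw [fgoA, if_neg hT1, if_pos hT2]

theorem fgoA_succ (fuel' : Nat) (s1 s2 step : Int) (hT1 : ¬(s1 + s2 ≥ 30 ∧ (step = 3 ∨ step = 5)))
    (hT2 : ¬((s1 + s2 < 30 ∧ step = 5) ∨ (s1 + s2 ≥ 30 ∧ step < 5))) :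
    fgoA (fuel' + 1) s1 s2 step =
      (if PySem.Int.mod step 2 ≠ 0 then
        pyAndI (pyAndI (pyAndI (fgoA fuel' (s1 + 1) s2 (step + 1)) (fgoA fuel' s1 (s2 + 1) (step + 1)))
          (fgoA fuel' (s1 * 2) s2 (step + 1))) (fgoA fuel' s1 (s2 * 2) (step + 1))
      else
        pyOrI (pyOrI (pyOrI (fgoA fuel' (s1 + 1) s2 (step + 1)) (fgoA fuel' s1 (s2 + 1) (step + 1)))
          (fgoA fuel' (s1 * 2) s2 (step + 1))) (fgoA fuel' s1 (s2 * 2) (step + 1))) := by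
  rw [fgoA, if_neg hT1, if_neg hT2]

theorem fgoB_hit (fuel : Nat) (s1 s2 step : Int) (m : PySem.Dict (Int × Int × Int) Int) (v : Int)
    (hm : m.get? (s1, s2, step) = some v) : fgoB fuel s1 s2 step m = (v, m) := by
  cases fuel <;> · rw [fgoB, hm]

theorem fgoB_term1 (fuel : Nat) (s1 s2 step : Int) (m : PySem.Dict (Int × Int × Int) Int)
    (hm : m.get? (s1, s2, step) = none) (hT1 : s1 + s2 ≥ 30 ∧ (step = 3 ∨ step = 5)) :
    fgoB fuel s1 s2 step m = (1, m) := by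
  cases fuel <;> · rw [fgoB, hm]; exact if_pos hT1

theorem fgoB_term2 (fuel : Nat) (s1 s2 step : Int) (m : PySem.Dict (Int × Int × Int) Int)
    (hm : m.get? (s1, s2, step) = none) (hT1 : ¬(s1 + s2 ≥ 30 ∧ (step = 3 ∨ step = 5)))
    (hT2 : (s1 + s2 < 30 ∧ step = 5) ∨ (s1 + s2 ≥ 30 ∧ step < 5)) :
    fgoB fuel s1 s2 step m = (0, m) := by
  cases fuel <;> · rw [fgoB, hm]; rw [if_neg hT1]; exact if_pos hT2

theorem fgoB_succ (fuel' : Nat) (s1 s2 step : Int) (m : PySem.Dict (Int × Int × Int) Int)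
    (hm : m.get? (s1, s2, step) = none) (hT1 : ¬(s1 + s2 ≥ 30 ∧ (step = 3 ∨ step = 5)))
    (hT2 : ¬((s1 + s2 < 30 ∧ step = 5) ∨ (s1 + s2 ≥ 30 ∧ step < 5))) :
    fgoB (fuel' + 1) s1 s2 step m =
      (let p1 := fgoB fuel' (s1 + 1) s2 (step + 1) m
       let p2 := fgoB fuel' s1 (s2 + 1) (step + 1) p1.2
       let p3 := fgoB fuel' (s1 * 2) s2 (step + 1) p2.2
       let p4 := fgoB fuel' s1 (s2 * 2) (step + 1) p3.2
       let res : Int :=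
         if PySem.Int.mod step 2 ≠ 0 then
           if p1.1 ≠ 0 ∧ p2.1 ≠ 0 ∧ p3.1 ≠ 0 ∧ p4.1 ≠ 0 then 1 else 0
         else
           if p1.1 ≠ 0 ∨ p2.1 ≠ 0 ∨ p3.1 ≠ 0 ∨ p4.1 ≠ 0 then 1 else 0
       (res, p4.2.insert (s1, s2, step) res)) := by
  rw [fgoB, hm]; rw [if_neg hT1, if_neg hT2]

-- fgoA only ever produces 0 or 1
theorem fgoA_zero_or_one (fuel : Nat) : ∀ s1 s2 step : Int,
    fgoA fuel s1 s2 step = 0 ∨ fgoA fuel s1 s2 step = 1 := by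
  induction fuel with
  | zero =>
    intro s1 s2 step
    rw [fgoA]
    split
    · exact Or.inr rfl
    · split
      · exact Or.inl rfl
      · exact Or.inl rfl
  | succ fuel' ih =>
    intro s1 s2 step
    rw [fgoA]
    split
    · exact Or.inr rfl
    · split
      · exact Or.inl rfl
      · have h1 := ih (s1 + 1) s2 (step + 1)
        have h2 := ih s1 (s2 + 1) (step + 1)
        have h3 := ih (s1 * 2) s2 (step + 1)
        have h4 := ih s1 (s2 * 2) (step + 1)
        split <;>
          rcases h1 with h1 | h1 <;> rcases h2 with h2 | h2 <;>
          rcases h3 with h3 | h3 <;> rcases h4 with h4 | h4 <;>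
          simp [pyAndI, pyOrI, h1, h2, h3, h4]

theorem pyAnd_chain (a b c d : Int)
    (ha : a = 0 ∨ a = 1) (hb : b = 0 ∨ b = 1) (hc : c = 0 ∨ c = 1) (hd : d = 0 ∨ d = 1) :
    pyAndI (pyAndI (pyAndI a b) c) d =
      if a ≠ 0 ∧ b ≠ 0 ∧ c ≠ 0 ∧ d ≠ 0 then 1 else 0 := by
  rcases ha with ha | ha <;> rcases hb with hb | hb <;> rcases hc with hc | hc <;>
    rcases hd with hd | hd <;> simp [pyAndI, ha, hb, hc, hd]

theorem pyOr_chain (a b c d : Int)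
    (ha : a = 0 ∨ a = 1) (hb : b = 0 ∨ b = 1) (hc : c = 0 ∨ c = 1) (hd : d = 0 ∨ d = 1) :
    pyOrI (pyOrI (pyOrI a b) c) d =
      if a ≠ 0 ∨ b ≠ 0 ∨ c ≠ 0 ∨ d ≠ 0 then 1 else 0 := by
  rcases ha with ha | ha <;> rcases hb with hb | hb <;> rcases hc with hc | hc <;>
    rcases hd with hd | hd <;> simp [pyOrI, ha, hb, hc, hd]

-- memo invariant: every stored value is the (fuel-correct) value of A's recursion at its key
def MemoInv (m : PySem.Dict (Int × Int × Int) Int) : Prop :=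
  ∀ k1 k2 k3 v, m.get? (k1, k2, k3) = some v → v = fgoA (5 - k3).toNat k1 k2 k3

theorem fgoB_correct (fuel : Nat) : ∀ (s1 s2 step : Int) (m : PySem.Dict (Int × Int × Int) Int),
    step ≤ 5 → fuel = (5 - step).toNat → MemoInv m →
    (fgoB fuel s1 s2 step m).1 = fgoA fuel s1 s2 step ∧ MemoInv (fgoB fuel s1 s2 step m).2 := by
  induction fuel with
  | zero =>
    intro s1 s2 step m hstep hfuel hinv
    have hstep5 : step = 5 := by omega
    subst hstep5
    cases hm : m.get? (s1, s2, 5) with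
    | some v =>
      rw [fgoB_hit 0 s1 s2 5 m v hm]
      exact ⟨hinv s1 s2 5 v hm, hinv⟩
    | none =>
      by_cases hT1 : s1 + s2 ≥ 30 ∧ ((5 : Int) = 3 ∨ (5 : Int) = 5)
      · rw [fgoB_term1 0 s1 s2 5 m hm hT1, fgoA_term1 0 s1 s2 5 hT1]; exact ⟨rfl, hinv⟩
      · have hT2 : (s1 + s2 < 30 ∧ (5 : Int) = 5) ∨ (s1 + s2 ≥ 30 ∧ (5 : Int) < 5) := by
          rcases Int.lt_or_le (s1 + s2) 30 with h | h
          · exact Or.inl ⟨h, rfl⟩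
          · exact absurd ⟨h, Or.inr rfl⟩ hT1
        rw [fgoB_term2 0 s1 s2 5 m hm hT1 hT2, fgoA_term2 0 s1 s2 5 hT1 hT2]; exact ⟨rfl, hinv⟩
  | succ fuel' ih =>
    intro s1 s2 step m hstep hfuel hinv
    cases hm : m.get? (s1, s2, step) with
    | some v =>
      rw [fgoB_hit (fuel' + 1) s1 s2 step m v hm]
      refine ⟨?_, hinv⟩
      have hval := hinv s1 s2 step v hm
      rw [← hfuel] at hval
      exact hval
    | none =>
      by_cases hT1 : s1 + s2 ≥ 30 ∧ (step = 3 ∨ step = 5)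
      · rw [fgoB_term1 _ s1 s2 step m hm hT1, fgoA_term1 _ s1 s2 step hT1]; exact ⟨rfl, hinv⟩
      by_cases hT2 : (s1 + s2 < 30 ∧ step = 5) ∨ (s1 + s2 ≥ 30 ∧ step < 5)
      · rw [fgoB_term2 _ s1 s2 step m hm hT1 hT2, fgoA_term2 _ s1 s2 step hT1 hT2]; exact ⟨rfl, hinv⟩
      -- non-terminal: step < 5 (at step = 5 one of the terminal conditions would hold)
      have hlt : step < 5 := by
        rcases lt_or_eq_of_le hstep with h | h
        · exact h
        · exfalso
          rcases Int.lt_or_le (s1 + s2) 30 with hs | hs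
          · exact hT2 (Or.inl ⟨hs, h⟩)
          · exact hT1 ⟨hs, Or.inr h⟩
      have hfuel' : fuel' = (5 - (step + 1)).toNat := by omega
      have hstep' : step + 1 ≤ 5 := by omega
      obtain ⟨e1, i1⟩ := ih (s1 + 1) s2 (step + 1) m hstep' hfuel' hinv
      obtain ⟨e2, i2⟩ := ih s1 (s2 + 1) (step + 1) _ hstep' hfuel' i1
      obtain ⟨e3, i3⟩ := ih (s1 * 2) s2 (step + 1) _ hstep' hfuel' i2
      obtain ⟨e4, i4⟩ := ih s1 (s2 * 2) (step + 1) _ hstep' hfuel' i3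
      have h1 := fgoA_zero_or_one fuel' (s1 + 1) s2 (step + 1)
      have h2 := fgoA_zero_or_one fuel' s1 (s2 + 1) (step + 1)
      have h3 := fgoA_zero_or_one fuel' (s1 * 2) s2 (step + 1)
      have h4 := fgoA_zero_or_one fuel' s1 (s2 * 2) (step + 1)
      rw [fgoB_succ fuel' s1 s2 step m hm hT1 hT2, fgoA_succ fuel' s1 s2 step hT1 hT2]
      simp only [e1, e2, e3, e4]
      have hval :
          (if PySem.Int.mod step 2 ≠ 0 then
            pyAndI (pyAndI (pyAndI (fgoA fuel' (s1 + 1) s2 (step + 1)) (fgoA fuel' s1 (s2 + 1) (step + 1)))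
              (fgoA fuel' (s1 * 2) s2 (step + 1))) (fgoA fuel' s1 (s2 * 2) (step + 1))
          else
            pyOrI (pyOrI (pyOrI (fgoA fuel' (s1 + 1) s2 (step + 1)) (fgoA fuel' s1 (s2 + 1) (step + 1)))
              (fgoA fuel' (s1 * 2) s2 (step + 1))) (fgoA fuel' s1 (s2 * 2) (step + 1))) =
          (if PySem.Int.mod step 2 ≠ 0 then
            if fgoA fuel' (s1 + 1) s2 (step + 1) ≠ 0 ∧ fgoA fuel' s1 (s2 + 1) (step + 1) ≠ 0 ∧
               fgoA fuel' (s1 * 2) s2 (step + 1) ≠ 0 ∧ fgoA fuel' s1 (s2 * 2) (step + 1) ≠ 0 then (1 : Int) else 0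
          else
            if fgoA fuel' (s1 + 1) s2 (step + 1) ≠ 0 ∨ fgoA fuel' s1 (s2 + 1) (step + 1) ≠ 0 ∨
               fgoA fuel' (s1 * 2) s2 (step + 1) ≠ 0 ∨ fgoA fuel' s1 (s2 * 2) (step + 1) ≠ 0 then 1 else 0) := by
        split
        · exact pyAnd_chain _ _ _ _ h1 h2 h3 h4
        · exact pyOr_chain _ _ _ _ h1 h2 h3 h4
      refine ⟨hval.symm, ?_⟩
      intro k1 k2 k3 v hv
      rw [PySem.Dict.get?_insert] at hv
      split at hv
      · rename_i hk
        simp only [Prod.mk.injEq] at hk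
        obtain ⟨hk1, hk2, hk3⟩ := hk
        subst hk1; subst hk2; subst hk3
        cases hv
        rw [← hfuel, fgoA_succ _ _ _ _ hT1 hT2, hval]
      · exact i4 k1 k2 k3 v hv

-- ===== VERDICT (by name: the statement is the Claim_ definition above) =====
theorem f_spec : Claim_equal_f := by
  intro s1 s2 step _ hpre
  unfold Spec_f f f_alt
  have hinv : MemoInv PySem.Dict.empty := by
    intro k1 k2 k3 v hv
    simp [PySem.Dict.get?_empty] at hv
  exact ((fgoB_correct (5 - step).toNat s1 s2 step PySem.Dict.empty hpre rfl hinv).1).symm
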